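-- pv_equiv track=rewrite | github.com/Gabrielcamargos28/ag_javascript | python/app.py | validar_soma_carry_over
-- ===== SOURCE A (Python) =====
-- def validar_soma_carry_over(palavras, valores_palavras, letter_to_digit):
--
--     palavras_revertidas = [palavra[::-1] for palavra in palavras]
--     max_len = max(len(palavra) for palavra in palavras_revertidas)
--
--     carry = 0
--     for i in range(max_len):
--         soma = carry
--         for j in range(len(palavras_revertidas) - 1):
--             if i < len(palavras_revertidas[j]):
--                 letra = palavras_revertidas[j][i]
--                 soma += letter_to_digit[letra]
--
--         if i < len(palavras_revertidas[-1]):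
--             letra = palavras_revertidas[-1][i]
--             soma -= letter_to_digit[letra]
--
--         if soma >= 10:
--             carry = 1
--         else:
--             carry = 0
--
--         if carry == 1 and i == max_len - 1:
--             return False
--     return True
-- ===== SOURCE B (Python) =====
-- def validar_soma_carry_over(palavras, valores_palavras, letter_to_digit):
--     max_len = max(len(p) for p in palavras)
--     nets = [0] * max_len
--
--     def acc(word, sign):
--         for k, ch in enumerate(reversed(word)):
--             nets[k] += sign * letter_to_digit[ch]
--
--     for w in palavras[:-1]:
--         acc(w, 1)
--     acc(palavras[-1], -1)
--
--     carry = 0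
--     for net in nets:
--         carry = 1 if carry + net >= 10 else 0
--     return carry == 0
-- ===== Notes on version B (the rewrite author's own statement) =====
-- stated objective: alternative
-- what changed: A scans column-by-column with a nested inner loop over the words and an early return inside the loop; B traverses word-by-word once to build a per-column net-value array and then folds the carry over that array in a separate second pass.
import Mathlib
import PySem

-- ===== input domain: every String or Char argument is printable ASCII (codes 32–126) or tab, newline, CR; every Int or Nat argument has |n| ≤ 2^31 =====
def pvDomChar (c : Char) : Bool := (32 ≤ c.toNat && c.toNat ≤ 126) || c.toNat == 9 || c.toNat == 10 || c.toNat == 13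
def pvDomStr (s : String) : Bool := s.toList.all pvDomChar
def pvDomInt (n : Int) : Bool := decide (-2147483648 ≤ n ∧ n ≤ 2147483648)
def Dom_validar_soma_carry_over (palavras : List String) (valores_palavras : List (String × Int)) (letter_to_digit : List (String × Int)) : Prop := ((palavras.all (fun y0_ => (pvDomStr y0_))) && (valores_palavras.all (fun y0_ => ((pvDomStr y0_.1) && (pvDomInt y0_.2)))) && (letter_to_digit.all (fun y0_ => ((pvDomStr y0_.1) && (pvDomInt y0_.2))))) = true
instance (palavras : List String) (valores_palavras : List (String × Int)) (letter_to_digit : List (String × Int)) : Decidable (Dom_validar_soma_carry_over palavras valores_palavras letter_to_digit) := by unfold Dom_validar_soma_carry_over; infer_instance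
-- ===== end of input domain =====

-- B builds the per-column net values word-by-word and folds the carry over them in a second
-- pass, instead of A's column-major nested loop with an early return ('alternative', same cost).

-- shared dict primitive: letter_to_digit[letra] (association list, first match; total form — Pre_ guarantees the key is present)
def pvLookup (ltd : List (String × Int)) (k : String) : Int :=
  ((ltd.find? (fun kv => kv.1 == k)).map (·.2)).getD 0

-- ===== PORT A =====
def pvSomaA (rev : List String) (ltd : List (String × Int)) (i : Int) (carry : Int) : Int :=
  -- soma = carry; for j in range(len(rev)-1): if i < len(rev[j]): soma += ltd[rev[j][i]]
  let soma := (PySem.List.pyRange 0 ((rev.length : Int) - 1) 1).foldl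
    (fun soma j =>
      if i < PySem.Str.len (PySem.List.pyGetD rev j "") then
        soma + pvLookup ltd (String.singleton ((PySem.Str.pyGet? (PySem.List.pyGetD rev j "") i).getD ' '))
      else soma) carry
  -- if i < len(rev[-1]): soma -= ltd[rev[-1][i]]
  match PySem.List.pyGet? rev (-1) with
  | some w =>
      if i < PySem.Str.len w then
        soma - pvLookup ltd (String.singleton ((PySem.Str.pyGet? w i).getD ' '))
      else soma
  | none => soma

def pvLoopA (rev : List String) (ltd : List (String × Int)) (maxLen : Int) :
    List Int → Int → Bool
  | [], _ => true
  | i :: rest, carry =>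
    let soma := pvSomaA rev ltd i carry
    let carry' : Int := if 10 ≤ soma then 1 else 0
    if carry' = 1 ∧ i = maxLen - 1 then false
    else pvLoopA rev ltd maxLen rest carry'

def validar_soma_carry_over (palavras : List String) (valores_palavras : List (String × Int)) (letter_to_digit : List (String × Int)) : Bool :=
  let rev := palavras.map (fun p => (PySem.Str.slice? p none none (-1)).getD "")   -- palavra[::-1]
  match PySem.List.max? (rev.map (fun w => PySem.Str.len w)) (fun x => x) with
  | none => true   -- unreachable under Pre_: Python raises ValueError on empty palavras
  | some maxLen => pvLoopA rev letter_to_digit maxLen (PySem.List.pyRange 0 maxLen 1) 0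

-- ===== PORT B =====
-- for k, ch in enumerate(reversed(word)): nets[k] += sign * ltd[ch]
def pvAccB (ltd : List (String × Int)) (sign : Int) (nets : List Int) (word : String) : List Int :=
  (PySem.List.enumerate word.toList.reverse 0).foldl
    (fun nets kc =>
      nets.set kc.1.toNat (nets.getD kc.1.toNat 0 + sign * pvLookup ltd (String.singleton kc.2)))
    nets

def pvCarryB (nets : List Int) : Int :=
  nets.foldl (fun carry net => if 10 ≤ carry + net then (1 : Int) else 0) 0

def validar_soma_carry_over_alt (palavras : List String) (valores_palavras : List (String × Int)) (letter_to_digit : List (String × Int)) : Bool :=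
  match PySem.List.max? (palavras.map (fun p => PySem.Str.len p)) (fun x => x) with
  | none => true   -- unreachable under Pre_: max() raises on empty palavras
  | some maxLen =>
    let nets0 : List Int := List.replicate maxLen.toNat 0
    let nets1 := (PySem.List.slice palavras none (some (-1))).foldl (pvAccB letter_to_digit 1) nets0
    let nets2 := match PySem.List.pyGet? palavras (-1) with
      | some w => pvAccB letter_to_digit (-1) nets1 w
      | none => nets1
    decide (pvCarryB nets2 = 0)

-- ===== PRECONDITION & SPEC =====
-- Pre_ excludes exactly the inputs where Python A raises: empty palavras (ValueError from max())
-- and any word letter missing from letter_to_digit (KeyError); A returns on everything else.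
def Pre_validar_soma_carry_over (palavras : List String) (valores_palavras : List (String × Int)) (letter_to_digit : List (String × Int)) : Prop :=
  palavras ≠ [] ∧
  (palavras.all (fun p => p.toList.all (fun c =>
    (letter_to_digit.find? (fun kv => kv.1 == String.singleton c)).isSome))) = true
instance (palavras : List String) (valores_palavras : List (String × Int)) (letter_to_digit : List (String × Int)) : Decidable (Pre_validar_soma_carry_over palavras valores_palavras letter_to_digit) := by unfold Pre_validar_soma_carry_over; infer_instance

def pvWitness_validar_soma_carry_over : List String × (List (String × Int)) × (List (String × Int)) :=
  (["ab", "b"], [], [("a", 5), ("b", 3)])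

def Spec_validar_soma_carry_over (palavras : List String) (valores_palavras : List (String × Int)) (letter_to_digit : List (String × Int)) (out : Bool) : Prop := out = validar_soma_carry_over_alt palavras valores_palavras letter_to_digit
instance (palavras : List String) (valores_palavras : List (String × Int)) (letter_to_digit : List (String × Int)) (out : Bool) : Decidable (Spec_validar_soma_carry_over palavras valores_palavras letter_to_digit out) := by unfold Spec_validar_soma_carry_over; infer_instance

-- ===== CLAIM (what is proved, stated in full; the proofs are below) =====
def Claim_equal_validar_soma_carry_over : Prop := ∀ (palavras : List String) (valores_palavras : List (String × Int)) (letter_to_digit : List (String × Int)), Dom_validar_soma_carry_over palavras valores_palavras letter_to_digit → Pre_validar_soma_carry_over palavras valores_palavras letter_to_digit → Spec_validar_soma_carry_over palavras valores_palavras letter_to_digit (validar_soma_carry_over palavras valores_palavras letter_to_digit)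

-- ===== LEMMAS AND PROOFS =====

-- A's reversed word list, and the common column-net specification both ports are reduced to.
def pvRev (ps : List String) : List String :=
  ps.map (fun p => (PySem.Str.slice? p none none (-1)).getD "")

def pvDv (ltd : List (String × Int)) (c : Char) : Int := pvLookup ltd (String.singleton c)

-- contribution of (already reversed) letter list l to column k
def pvContrib (ltd : List (String × Int)) (l : List Char) (k : Nat) : Int :=
  if k < l.length then pvDv ltd (l.getD k ' ') else 0

-- net value of column k: letters of all words but the last added, the last word's subtracted
def pvColnet (ltd : List (String × Int)) (ps : List String) (k : Nat) : Int :=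
  (ps.dropLast.map (fun p => pvContrib ltd p.toList.reverse k)).sum -
    (ps.getLast?).elim 0 (fun p => pvContrib ltd p.toList.reverse k)

-- one carry step at column i
def pvStepI (ltd : List (String × Int)) (ps : List String) (carry i : Int) : Int :=
  if 10 ≤ carry + pvColnet ltd ps i.toNat then 1 else 0

lemma pvRev_eq (ps : List String) :
    pvRev ps = ps.map (fun p => String.ofList p.toList.reverse) := by
  simp [pvRev, PySem.Str.slice?_none_none_neg_one]

lemma pvRev_ne_nil {ps : List String} (hps : ps ≠ []) : pvRev ps ≠ [] := by
  simp [pvRev, hps]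

lemma pvOfList_toList (l : List Char) : (String.ofList l).toList = l := by simp

lemma pvStrLen_eq (s : String) : PySem.Str.len s = (s.toList.length : Int) := by simp

lemma pvStrGet (w : String) (k : Nat) :
    (PySem.Str.pyGet? w (k : Int)).getD ' ' = w.toList.getD k ' ' := by
  rw [PySem.Str.pyGet?_natCast, List.getD_eq_getElem?_getD]

-- A's inner word loop is carry + per-column sum over all but the last word
lemma pvInnerA_eq (ltd : List (String × Int)) (rev : List String) (hne : rev ≠ [])
    (k : Nat) (carry : Int) :
    (PySem.List.pyRange 0 ((rev.length : Int) - 1) 1).foldl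
      (fun soma j =>
        if (k : Int) < PySem.Str.len (PySem.List.pyGetD rev j "") then
          soma + pvLookup ltd (String.singleton ((PySem.Str.pyGet? (PySem.List.pyGetD rev j "") (k : Int)).getD ' '))
        else soma) carry
    = carry + (rev.dropLast.map (fun w => pvContrib ltd w.toList k)).sum := by
  have hlen0 : rev.length ≠ 0 := by simpa using hne
  have h1 : ((rev.length : Int) - 1) = ((rev.dropLast.length : Nat) : Int) := by
    simp [List.length_dropLast]; omega
  rw [h1]
  have hcongr1 :
      (PySem.List.pyRange 0 ((rev.dropLast.length : Nat) : Int) 1).foldl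
        (fun soma j =>
          if (k : Int) < PySem.Str.len (PySem.List.pyGetD rev j "") then
            soma + pvLookup ltd (String.singleton ((PySem.Str.pyGet? (PySem.List.pyGetD rev j "") (k : Int)).getD ' '))
          else soma) carry
      = (PySem.List.pyRange 0 ((rev.dropLast.length : Nat) : Int) 1).foldl
        (fun soma j =>
          if (k : Int) < PySem.Str.len (PySem.List.pyGetD rev.dropLast j "") then
            soma + pvLookup ltd (String.singleton ((PySem.Str.pyGet? (PySem.List.pyGetD rev.dropLast j "") (k : Int)).getD ' '))
          else soma) carry := by
    apply PySem.List.foldl_congr_mem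
    intro acc j hj
    rcases (PySem.List.mem_pyRange_one).1 hj with ⟨hj0, hj1⟩
    have hjlt : j.toNat < rev.dropLast.length := by omega
    have hw : PySem.List.pyGetD rev j "" = PySem.List.pyGetD rev.dropLast j "" := by
      have hj : j = ((j.toNat : Nat) : Int) := by omega
      rw [hj, PySem.List.pyGetD_natCast, PySem.List.pyGetD_natCast]
      rw [List.getD_eq_getElem _ _ (by simp only [List.length_dropLast] at hjlt ⊢; omega),
          List.getD_eq_getElem _ _ hjlt]
      exact (List.getElem_dropLast hjlt).symm
    rw [hw]
  rw [hcongr1]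
  rw [PySem.List.foldl_pyRange_zero_pyGetD' rev.dropLast ""
        (fun soma w =>
          if (k : Int) < PySem.Str.len w then
            soma + pvLookup ltd (String.singleton ((PySem.Str.pyGet? w (k : Int)).getD ' '))
          else soma) carry]
  have hcongr2 :
      rev.dropLast.foldl
        (fun soma w =>
          if (k : Int) < PySem.Str.len w then
            soma + pvLookup ltd (String.singleton ((PySem.Str.pyGet? w (k : Int)).getD ' '))
          else soma) carry
      = rev.dropLast.foldl (fun soma w => soma + pvContrib ltd w.toList k) carry := by
    apply PySem.List.foldl_congr_mem
    intro acc w _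
    rw [pvStrLen_eq]
    by_cases h : k < w.toList.length
    · rw [if_pos (by exact_mod_cast h)]
      unfold pvContrib pvDv
      rw [if_pos h, pvStrGet]
    · rw [if_neg (by omega)]
      unfold pvContrib
      rw [if_neg h, add_zero]
  rw [hcongr2, PySem.List.foldl_add]

-- A's whole column body equals carry + pvColnet
lemma pvSomaA_eq (ltd : List (String × Int)) (ps : List String) (hps : ps ≠ [])
    (k : Nat) (carry : Int) :
    pvSomaA (pvRev ps) ltd (k : Int) carry = carry + pvColnet ltd ps k := by
  have hne := pvRev_ne_nil hps
  obtain ⟨p, hp⟩ : ∃ p, ps.getLast? = some p := by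
    cases hq : ps.getLast? with
    | none => exact absurd (List.getLast?_eq_none_iff.1 hq) hps
    | some p => exact ⟨p, rfl⟩
  have hgl : (pvRev ps).getLast? = some (String.ofList p.toList.reverse) := by
    rw [pvRev_eq, List.getLast?_map, hp]; rfl
  have hdl : (pvRev ps).dropLast.map (fun w => pvContrib ltd w.toList k)
      = ps.dropLast.map (fun p => pvContrib ltd p.toList.reverse k) := by
    rw [pvRev_eq, ← List.map_dropLast, List.map_map]
    apply List.map_congr_left
    intro q _
    simp only [Function.comp_apply]
    rw [pvOfList_toList]
  unfold pvSomaA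
  rw [pvInnerA_eq ltd (pvRev ps) hne k carry]
  rw [PySem.List.pyGet?_neg_one, hgl, hdl]
  show (if (k : Int) < PySem.Str.len (String.ofList p.toList.reverse) then
          (carry + (ps.dropLast.map (fun p => pvContrib ltd p.toList.reverse k)).sum)
            - pvLookup ltd (String.singleton ((PySem.Str.pyGet? (String.ofList p.toList.reverse) (k : Int)).getD ' '))
        else (carry + (ps.dropLast.map (fun p => pvContrib ltd p.toList.reverse k)).sum))
      = carry + pvColnet ltd ps k
  unfold pvColnet
  rw [hp, Option.elim_some]
  rw [pvStrLen_eq (String.ofList p.toList.reverse), pvOfList_toList]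
  by_cases h : k < p.toList.reverse.length
  · rw [if_pos (by exact_mod_cast h)]
    unfold pvContrib pvDv
    rw [if_pos h, pvStrGet, pvOfList_toList]
    ring
  · rw [if_neg (by omega)]
    unfold pvContrib
    rw [if_neg h]
    ring

-- A's loop with its early return is the plain carry fold, compared with 1
lemma pvLoopA_eq (ltd : List (String × Int)) (ps : List String) (hps : ps ≠ []) (m : Int) :
    ∀ (n : Nat) (a carry : Int), n = (m - a).toNat → 0 ≤ a → a < m →
      pvLoopA (pvRev ps) ltd m (PySem.List.pyRange a m 1) carry
        = decide ((PySem.List.pyRange a m 1).foldl (pvStepI ltd ps) carry ≠ 1) := by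
  intro n
  induction n with
  | zero => intro a carry hn h0 h1; omega
  | succ n ih =>
    intro a carry hn h0 h1
    rw [PySem.List.pyRange_one_cons h1]
    have ha : a = ((a.toNat : Nat) : Int) := by omega
    have hsoma : pvSomaA (pvRev ps) ltd a carry = carry + pvColnet ltd ps a.toNat := by
      rw [ha]; exact pvSomaA_eq ltd ps hps a.toNat carry
    show (if (if 10 ≤ pvSomaA (pvRev ps) ltd a carry then (1:Int) else 0) = 1 ∧ a = m - 1 then false
          else pvLoopA (pvRev ps) ltd m (PySem.List.pyRange (a+1) m 1)
                 (if 10 ≤ pvSomaA (pvRev ps) ltd a carry then (1:Int) else 0)) = _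
    have hstep : (if 10 ≤ pvSomaA (pvRev ps) ltd a carry then (1:Int) else 0) = pvStepI ltd ps carry a := by
      rw [hsoma]; rfl
    rw [hstep]
    rw [List.foldl_cons]
    by_cases hlast : a = m - 1
    · have hnil : PySem.List.pyRange (a + 1) m 1 = [] := PySem.List.pyRange_one_eq_nil (by omega)
      rw [hnil]
      by_cases hc : pvStepI ltd ps carry a = 1
      · rw [if_pos ⟨hc, hlast⟩]; simp [hc]
      · rw [if_neg (by tauto)]
        simp only [pvLoopA, List.foldl_nil]
        simp [hc]
    · have hcond : ¬ ((pvStepI ltd ps carry a = 1) ∧ a = m - 1) := by tauto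
      rw [if_neg hcond]
      exact ih (a + 1) (pvStepI ltd ps carry a) (by omega) (by omega) (by omega)

-- the carry is always 0 or 1
lemma pvFold_zero_one (ltd : List (String × Int)) (ps : List String) :
    ∀ (l : List Int) (c : Int), c = 0 ∨ c = 1 →
      (l.foldl (pvStepI ltd ps) c = 0 ∨ l.foldl (pvStepI ltd ps) c = 1) := by
  intro l
  induction l with
  | nil => intro c hc; simpa using hc
  | cons i l ih =>
    intro c _
    rw [List.foldl_cons]
    apply ih
    unfold pvStepI
    split <;> simp

-- list update / getD
lemma pvGetD_set (l : List Int) (i : Nat) (v : Int) (k : Nat) :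
    (l.set i v).getD k 0 = if i = k ∧ i < l.length then v else l.getD k 0 := by
  simp [List.getD_eq_getElem?_getD, List.getElem?_set]
  split_ifs <;> simp_all <;> omega

lemma pvGetD_replicate (n k : Nat) : (List.replicate n (0 : Int)).getD k 0 = 0 := by
  rw [List.getD_eq_getElem?_getD]
  rcases Nat.lt_or_ge k n with h | h
  · simp [List.getElem?_replicate, h]
  · rw [List.getElem?_eq_none (by simpa using h)]; rfl

-- B's per-word accumulation, elementwise (enumerate fold, general start index)
lemma pvAccGo (ltd : List (String × Int)) (sign : Int) (l : List Char) :
    ∀ (s : Nat) (nets : List Int), s + l.length ≤ nets.length → ∀ k : Nat,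
      ((PySem.List.enumerate l (s : Int)).foldl
        (fun nets kc =>
          nets.set kc.1.toNat (nets.getD kc.1.toNat 0 + sign * pvLookup ltd (String.singleton kc.2)))
        nets).getD k 0
      = nets.getD k 0 + (if s ≤ k ∧ k < s + l.length then sign * pvDv ltd (l.getD (k - s) ' ') else 0) := by
  induction l with
  | nil =>
    intro s nets _ k
    rw [PySem.List.enumerate_nil]
    simp only [List.foldl_nil]
    have hno : ¬ (s ≤ k ∧ k < s + List.length ([] : List Char)) := by
      simp only [List.length_nil]; omega
    rw [if_neg hno]; ring
  | cons c l ih =>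
    intro s nets hlen k
    rw [PySem.List.enumerate_cons]
    have hcast : (s : Int) + 1 = (((s + 1 : Nat)) : Int) := by push_cast; ring
    rw [List.foldl_cons, hcast]
    have htn : ((s : Int)).toNat = s := by omega
    rw [ih (s + 1) _ (by
      rw [List.length_set]
      simp only [List.length_cons] at hlen
      omega) k]
    rw [htn, pvGetD_set]
    by_cases hks : s = k
    · subst hks
      have hslt : s < nets.length := by simp only [List.length_cons] at hlen; omega
      rw [if_pos ⟨rfl, hslt⟩]
      have h2 : ¬ (s + 1 ≤ s ∧ s < s + 1 + l.length) := by omega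
      rw [if_neg h2]
      have h3 : s ≤ s ∧ s < s + (c :: l).length := by
        simp only [List.length_cons]; omega
      rw [if_pos h3]
      simp [pvDv]
    · rw [if_neg (by tauto)]
      by_cases h4 : s + 1 ≤ k ∧ k < s + 1 + l.length
      · rw [if_pos h4]
        have h5 : s ≤ k ∧ k < s + (c :: l).length := by
          simp only [List.length_cons]; omega
        rw [if_pos h5]
        have h6 : k - s = (k - (s + 1)) + 1 := by omega
        rw [h6]
        simp
      · rw [if_neg h4]
        have h7 : ¬ (s ≤ k ∧ k < s + (c :: l).length) := by
          simp only [List.length_cons]; omega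
        rw [if_neg h7]

lemma pvAccB_getD (ltd : List (String × Int)) (sign : Int) (nets : List Int) (w : String)
    (h : w.toList.length ≤ nets.length) (k : Nat) :
    (pvAccB ltd sign nets w).getD k 0
      = nets.getD k 0 + sign * pvContrib ltd w.toList.reverse k := by
  unfold pvAccB
  have hgo := pvAccGo ltd sign w.toList.reverse 0 nets (by simpa using h) k
  simp only [Nat.cast_zero] at hgo
  rw [hgo]
  unfold pvContrib
  by_cases hk : k < w.toList.reverse.length
  · rw [if_pos (by omega), if_pos hk]
    simp [pvDv]
  · rw [if_neg (by omega), if_neg hk]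
    ring

lemma pvFoldSet_length (ltd : List (String × Int)) (sign : Int) :
    ∀ (l : List (Int × Char)) (nets : List Int),
      (l.foldl (fun nets kc =>
        nets.set kc.1.toNat (nets.getD kc.1.toNat 0 + sign * pvLookup ltd (String.singleton kc.2))) nets).length
      = nets.length := by
  intro l
  induction l with
  | nil => intro nets; rfl
  | cons x l ih => intro nets; rw [List.foldl_cons, ih]; simp

lemma pvAccB_length (ltd : List (String × Int)) (sign : Int) (nets : List Int) (w : String) :
    (pvAccB ltd sign nets w).length = nets.length := by
  unfold pvAccB; exact pvFoldSet_length ltd sign _ nets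

lemma pvFoldAccB_length (ltd : List (String × Int)) (sign : Int) :
    ∀ (ws : List String) (nets : List Int),
      (ws.foldl (pvAccB ltd sign) nets).length = nets.length := by
  intro ws
  induction ws with
  | nil => intro nets; rfl
  | cons w ws ih => intro nets; rw [List.foldl_cons, ih, pvAccB_length]

lemma pvFoldAccB_getD (ltd : List (String × Int)) (sign : Int) :
    ∀ (ws : List String) (nets : List Int), (∀ w ∈ ws, w.toList.length ≤ nets.length) → ∀ k : Nat,
      (ws.foldl (pvAccB ltd sign) nets).getD k 0
        = nets.getD k 0 + sign * (ws.map (fun w => pvContrib ltd w.toList.reverse k)).sum := by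
  intro ws
  induction ws with
  | nil => intro nets _ k; simp
  | cons w ws ih =>
    intro nets hlen k
    rw [List.foldl_cons]
    rw [ih (pvAccB ltd sign nets w)
        (by intro w2 hw2; rw [pvAccB_length]; exact hlen w2 (by simp [hw2])) k]
    rw [pvAccB_getD ltd sign nets w (hlen w (by simp)) k]
    simp only [List.map_cons, List.sum_cons]
    ring

-- the carry folds on both sides coincide
lemma pvCarryB_map (ltd : List (String × Int)) (ps : List String) (M : Nat) :
    pvCarryB ((List.range M).map (fun k => pvColnet ltd ps k))
      = (PySem.List.pyRange 0 (M : Int) 1).foldl (pvStepI ltd ps) 0 := by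
  rw [PySem.List.pyRange_zero_nat]
  unfold pvCarryB
  rw [List.foldl_map, List.foldl_map]
  apply PySem.List.foldl_congr_mem
  intro acc k _
  unfold pvStepI
  simp

theorem validar_soma_carry_over_spec : Claim_equal_validar_soma_carry_over := by
  unfold Claim_equal_validar_soma_carry_over
  intro ps vp ltd _ hpre
  obtain ⟨hps, -⟩ := hpre
  unfold Spec_validar_soma_carry_over
  simp only [validar_soma_carry_over, validar_soma_carry_over_alt]
  have hml : ((ps.map (fun p => (PySem.Str.slice? p none none (-1)).getD "")).map (fun w => PySem.Str.len w))
      = ps.map (fun p => PySem.Str.len p) := by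
    have h := pvRev_eq ps
    unfold pvRev at h
    rw [h, List.map_map]
    apply List.map_congr_left
    intro p _
    simp
  rw [hml]
  cases hmax : PySem.List.max? (ps.map (fun p => PySem.Str.len p)) (fun x => x) with
  | none => rfl
  | some m =>
    simp only []
    rw [show (List.map (fun p => (PySem.Str.slice? p none none (-1)).getD "") ps) = pvRev ps from rfl]
    -- facts about m
    have hmem : m ∈ ps.map (fun p => PySem.Str.len p) := PySem.List.max?_mem hmax
    have hm0 : 0 ≤ m := by
      rcases List.mem_map.1 hmem with ⟨p, -, hp⟩
      subst hp; simp
    have hbound : ∀ w ∈ ps, w.toList.length ≤ m.toNat := by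
      intro w hw
      have h := PySem.List.max?_isMax hmax (PySem.Str.len w) (List.mem_map.2 ⟨w, hw, rfl⟩)
      rw [pvStrLen_eq] at h
      omega
    -- B side: nets2 is the column-net table
    have hlast : PySem.List.pyGet? ps (-1) = some (ps.getLast hps) := by
      rw [PySem.List.pyGet?_neg_one, List.getLast?_eq_getLast hps]
    rw [PySem.List.slice_to_neg_one, hlast]
    simp only []
    have hlen1 : ((ps.dropLast.foldl (pvAccB ltd 1) (List.replicate m.toNat 0))).length = m.toNat := by
      rw [pvFoldAccB_length]; simp
    have hnets2len : (pvAccB ltd (-1) (ps.dropLast.foldl (pvAccB ltd 1) (List.replicate m.toNat 0)) (ps.getLast hps)).length = m.toNat := by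
      rw [pvAccB_length]; exact hlen1
    have hnets2get : ∀ k : Nat,
        (pvAccB ltd (-1) (ps.dropLast.foldl (pvAccB ltd 1) (List.replicate m.toNat 0)) (ps.getLast hps)).getD k 0
          = pvColnet ltd ps k := by
      intro k
      rw [pvAccB_getD ltd (-1) _ _ (by rw [hlen1]; exact hbound _ (List.getLast_mem hps)) k]
      rw [pvFoldAccB_getD ltd 1 ps.dropLast (List.replicate m.toNat 0)
          (by intro w hw; simp only [List.length_replicate]; exact hbound w (List.dropLast_subset _ hw)) k]
      rw [pvGetD_replicate]
      unfold pvColnet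
      rw [List.getLast?_eq_getLast hps, Option.elim_some]
      ring
    have hnets2 : (pvAccB ltd (-1) (ps.dropLast.foldl (pvAccB ltd 1) (List.replicate m.toNat 0)) (ps.getLast hps))
        = (List.range m.toNat).map (fun k => pvColnet ltd ps k) := by
      apply List.ext_getElem
      · simp [hnets2len]
      · intro k hk hk2
        have h1 : (pvAccB ltd (-1) (ps.dropLast.foldl (pvAccB ltd 1) (List.replicate m.toNat 0)) (ps.getLast hps))[k]
            = (pvAccB ltd (-1) (ps.dropLast.foldl (pvAccB ltd 1) (List.replicate m.toNat 0)) (ps.getLast hps)).getD k 0 := by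
          rw [List.getD_eq_getElem _ _ hk]
        rw [h1, hnets2get k]
        rw [hnets2len] at hk
        simp [hk]
    have hmatch : (match some (ps.getLast hps) with
        | some w => pvAccB ltd (-1) (List.foldl (pvAccB ltd 1) (List.replicate m.toNat 0) ps.dropLast) w
        | none => List.foldl (pvAccB ltd 1) (List.replicate m.toNat 0) ps.dropLast)
        = (List.range m.toNat).map (fun k => pvColnet ltd ps k) := hnets2
    have hmcast : ((m.toNat : Nat) : Int) = m := by omega
    simp only [hmatch, pvCarryB_map ltd ps m.toNat, hmcast]
    by_cases hM : m = 0
    · subst hM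
      simp only [PySem.List.pyRange_one_eq_nil (by omega : (0:Int) ≤ 0)]
      simp [pvLoopA]
    · rw [pvLoopA_eq ltd ps hps m ((m - 0).toNat) 0 0 rfl (by omega) (by omega)]
      have hfold := pvFold_zero_one ltd ps (PySem.List.pyRange 0 m 1) 0 (Or.inl rfl)
      rcases hfold with h | h <;> simp [h]
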